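-- pv_equiv track=rewrite | github.com/likelion-Jiyeong/algorithm | programmers/42626.py | solution
-- ===== SOURCE A (Python) =====
-- import heapq
--
-- def solution(scoville, K):
--     answer = 0
--     heapq.heapify(scoville)
--
--     while scoville:
--         if scoville[0] >= K:
--             return answer
--
--         if len(scoville) < 2:
--             return -1
--
--         first = heapq.heappop(scoville)
--         second = heapq.heappop(scoville)
--         new_scoville = first + (second * 2)
--
--         heapq.heappush(scoville, new_scoville)
--         answer += 1
--     return -1
-- ===== SOURCE B (Python) =====
-- def solution(scoville, K):
--     # Two-queue merge technique (as in linear-time Huffman coding): sort the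
--     # originals once; mixes are produced in an order that keeps a plain FIFO
--     # list sorted, so the smallest element is always at one of the two fronts.
--     # No priority queue is maintained at any point.  Return value only: unlike
--     # A, this does not reorder the caller's list in place.
--     base = sorted(scoville)
--     mixes = []
--     i = 0  # front of the base queue
--     j = 0  # front of the mixes queue
--     answer = 0
--     while i < len(base) or j < len(mixes):
--         if j == len(mixes) or (i < len(base) and base[i] <= mixes[j]):
--             smallest = base[i]
--         else:
--             smallest = mixes[j]
--         if smallest >= K:
--             return answer
--         if (len(base) - i) + (len(mixes) - j) < 2:
--             return -1
--         if j == len(mixes) or (i < len(base) and base[i] <= mixes[j]):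
--             a = base[i]; i += 1
--         else:
--             a = mixes[j]; j += 1
--         if j == len(mixes) or (i < len(base) and base[i] <= mixes[j]):
--             b = base[i]; i += 1
--         else:
--             b = mixes[j]; j += 1
--         mixes.append(a + 2 * b)
--         answer += 1
--     return -1
-- ===== Notes on version B (the rewrite author's own statement) =====
-- stated objective: alternative
-- what changed: Replaces the binary heap with the two-queue merge technique (as in linear-time Huffman coding): sort once, then keep the originals and the newly created mixes in two plain FIFO queues; the proof shows the mix queue stays sorted (every pending mix m satisfies m <= 3x for any older pool element x, so a+2b >= every pending mix), hence the minimum is always at one of the two fronts and each merge step is O(1) with no priority structure; return value only - B does not mutate the caller's list, while A heapifies it in place.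
import Mathlib
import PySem

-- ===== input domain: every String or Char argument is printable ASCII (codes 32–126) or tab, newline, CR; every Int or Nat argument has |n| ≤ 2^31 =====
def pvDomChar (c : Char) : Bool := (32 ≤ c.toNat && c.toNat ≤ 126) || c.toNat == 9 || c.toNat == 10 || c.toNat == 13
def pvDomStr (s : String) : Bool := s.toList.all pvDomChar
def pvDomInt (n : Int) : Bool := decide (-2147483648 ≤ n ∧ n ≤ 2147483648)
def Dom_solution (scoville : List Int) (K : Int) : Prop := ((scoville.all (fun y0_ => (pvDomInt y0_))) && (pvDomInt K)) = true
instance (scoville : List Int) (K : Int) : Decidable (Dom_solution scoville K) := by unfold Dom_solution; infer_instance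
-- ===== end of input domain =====

-- B replaces A's binary heap with the two-queue merge technique (as in linear-time
-- Huffman coding): sort once, then keep originals and newly created mixes in two
-- plain FIFO queues read through front indices — the minimum is always at one of
-- the two fronts, so no priority structure is ever maintained.  Equivalence is
-- about the RETURN value only: A heapifies its argument in place, B does not
-- mutate it.  Objective: alternative algorithm.

-- ===== PORT A =====
-- helpers: literal transliterations of CPython's heapq (_siftdown, _siftup, heappush, heappop, heapify)
def pySiftdownLoop (heap : List Int) (startpos pos : Nat) (newitem : Int) : List Int :=
  if _h : startpos < pos then
    let parentpos := (pos - 1) / 2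
    let parent := heap.getD parentpos 0
    if newitem < parent then
      pySiftdownLoop (heap.set pos parent) startpos parentpos newitem
    else
      heap.set pos newitem
  else
    heap.set pos newitem
termination_by pos
decreasing_by omega

def pySiftupLoop (heap : List Int) (endpos pos : Nat) : List Int × Nat :=
  let c := 2 * pos + 1
  if _h : c < endpos then
    let c2 := if c + 1 < endpos ∧ ¬ (heap.getD c 0 < heap.getD (c + 1) 0) then c + 1 else c
    pySiftupLoop (heap.set pos (heap.getD c2 0)) endpos c2
  else
    (heap, pos)
termination_by endpos - pos
decreasing_by split <;> omega

def pySiftup (heap : List Int) (pos : Nat) : List Int :=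
  let newitem := heap.getD pos 0
  let r := pySiftupLoop heap heap.length pos
  pySiftdownLoop r.1 pos r.2 newitem

def pyHeappush (heap : List Int) (item : Int) : List Int :=
  pySiftdownLoop (heap ++ [item]) 0 heap.length item

def pyHeappop (heap : List Int) : Int × List Int :=
  let lastelt := heap.getLast?.getD 0
  let rest := heap.dropLast
  if rest.isEmpty then (lastelt, [])
  else (rest.headD 0, pySiftup (rest.set 0 lastelt) 0)

def pyHeapify (x : List Int) : List Int :=
  (List.range (x.length / 2)).reverse.foldl (fun h i => pySiftup h i) x

def solLoopA (fuel : Nat) (heap : List Int) (answer : Int) (K : Int) : Int :=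
  if heap.isEmpty then -1
  else if K ≤ heap.headD 0 then answer
  else if heap.length < 2 then -1
  else
    match fuel with
    | 0 => -1
    | fuel + 1 =>
      let p1 := pyHeappop heap
      let p2 := pyHeappop p1.2
      solLoopA fuel (pyHeappush p2.2 (p1.1 + p2.1 * 2)) (answer + 1) K

def solution (scoville : List Int) (K : Int) : Int :=
  solLoopA scoville.length (pyHeapify scoville) 0 K

-- ===== PORT B =====
-- two FIFO queues: `base` (sorted originals, front index i) and `mixes` (created
-- mixes, front index j); the smallest element is always at one of the two fronts
def twoLoop (fuel : Nat) (base : List Int) (i : Nat) (mixes : List Int) (j : Nat)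
    (answer : Int) (K : Int) : Int :=
  if i < base.length ∨ j < mixes.length then
    let m1 := if j = mixes.length ∨ (i < base.length ∧ base.getD i 0 ≤ mixes.getD j 0)
      then base.getD i 0 else mixes.getD j 0
    if K ≤ m1 then answer
    else if (base.length - i) + (mixes.length - j) < 2 then -1
    else
      match fuel with
      | 0 => -1
      | fuel + 1 =>
        let p1 : Int × Nat × Nat :=
          if j = mixes.length ∨ (i < base.length ∧ base.getD i 0 ≤ mixes.getD j 0)
          then (base.getD i 0, i + 1, j) else (mixes.getD j 0, i, j + 1)
        let p2 : Int × Nat × Nat :=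
          if p1.2.2 = mixes.length ∨ (p1.2.1 < base.length ∧ base.getD p1.2.1 0 ≤ mixes.getD p1.2.2 0)
          then (base.getD p1.2.1 0, p1.2.1 + 1, p1.2.2) else (mixes.getD p1.2.2 0, p1.2.1, p1.2.2 + 1)
        twoLoop fuel base p2.2.1 (mixes ++ [p1.1 + 2 * p2.1]) p2.2.2 (answer + 1) K
  else -1

def solution_alt (scoville : List Int) (K : Int) : Int :=
  twoLoop scoville.length (PySem.List.sorted scoville (fun x => x) false) 0 [] 0 0 K

-- ===== PRECONDITION & SPEC =====
-- (no Pre_: the Python A returns normally on every list of ints)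
def Spec_solution (scoville : List Int) (K : Int) (out : Int) : Prop := out = solution_alt scoville K
instance (scoville : List Int) (K : Int) (out : Int) : Decidable (Spec_solution scoville K out) := by unfold Spec_solution; infer_instance

-- ===== CLAIM (what is proved, stated in full; the proofs are below) =====
def Claim_equal_solution : Prop := ∀ (scoville : List Int) (K : Int), Dom_solution scoville K → Spec_solution scoville K (solution scoville K)

-- ===== LEMMAS AND PROOFS =====

theorem gset_self (l : List Int) (i : Nat) (a : Int) (h : i < l.length) :
    (l.set i a).getD i 0 = a := by
  simp [List.getD_eq_getElem?_getD, List.getElem?_set_self, h]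

theorem gset_ne (l : List Int) (i j : Nat) (a : Int) (h : i ≠ j) :
    (l.set i a).getD j 0 = l.getD j 0 := by
  simp [List.getD_eq_getElem?_getD, List.getElem?_set_ne h]

theorem set_self (l : List Int) (i : Nat) (h : i < l.length) : l.set i (l.getD i 0) = l := by
  have : l.getD i 0 = l[i] := by simp [List.getD_eq_getElem?_getD, List.getElem?_eq_getElem h]
  rw [this]; exact List.set_getElem_self h

theorem cons_set_perm (t : List Int) (k : Nat) (a : Int) (h : k < t.length) :
    List.Perm (t.getD k 0 :: t.set k a) (a :: t) := by
  induction t generalizing k with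
  | nil => simp at h
  | cons b u ih =>
    cases k with
    | zero => simpa using List.Perm.swap a b u
    | succ k =>
      simp only [List.getD_cons_succ, List.set_cons_succ]
      exact ((List.Perm.swap _ _ _).trans (List.Perm.cons b (ih k (by simpa using h)))).trans
        (List.Perm.swap _ _ _)

theorem swap_perm (l : List Int) (i j : Nat) (hi : i < l.length) (hj : j < l.length) :
    List.Perm ((l.set i (l.getD j 0)).set j (l.getD i 0)) l := by
  induction l generalizing i j with
  | nil => simp at hi
  | cons a t ih =>
    cases i with
    | zero =>
      cases j with
      | zero => simp [List.getD_cons_zero]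
      | succ k =>
        simp only [List.getD_cons_zero, List.getD_cons_succ, List.set_cons_zero,
          List.set_cons_succ]
        exact cons_set_perm t k a (by simpa using hj)
    | succ m =>
      cases j with
      | zero =>
        simp only [List.getD_cons_zero, List.getD_cons_succ, List.set_cons_zero,
          List.set_cons_succ]
        exact cons_set_perm t m a (by simpa using hi)
      | succ k =>
        simp only [List.getD_cons_succ, List.set_cons_succ]
        exact List.Perm.cons a (ih m k (by simpa using hi) (by simpa using hj))

def desc (s j : Nat) : Bool :=
  if j = s then true
  else if j ≤ s then false
  else desc s ((j - 1) / 2)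
termination_by j
decreasing_by omega

theorem desc_self (s : Nat) : desc s s = true := by rw [desc]; simp

theorem desc_ge {s j : Nat} (h : desc s j = true) : s ≤ j := by
  rw [desc] at h
  split_ifs at h with h1 h2
  · omega
  · omega

theorem desc_zero (j : Nat) : desc 0 j = true := by
  induction j using Nat.strongRecOn with
  | ind j ih =>
    rw [desc]
    split_ifs with h1 h2
    · rfl
    · omega
    · exact ih ((j - 1) / 2) (by omega)

theorem desc_parent {s c : Nat} (h : desc s c = true) (hne : c ≠ s) :
    desc s ((c - 1) / 2) = true := by
  rw [desc] at h
  split_ifs at h with h1 h2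
  · exact absurd h1 hne
  · exact h

theorem desc_child {s p c : Nat} (hp : desc s p = true) (hc : c = 2 * p + 1 ∨ c = 2 * p + 2) :
    desc s c = true := by
  have hps := desc_ge hp
  have hcp : (c - 1) / 2 = p := by omega
  rw [desc]
  split_ifs with h1 h2
  · rfl
  · omega
  · rw [hcp]; exact hp

theorem child_eq (c : Nat) (h : 0 < c) : c = 2 * ((c - 1) / 2) + 1 ∨ c = 2 * ((c - 1) / 2) + 2 := by
  omega

def Hinv (i : Nat) (l : List Int) : Prop :=
  ∀ c : Nat, 0 < c → c < l.length → i ≤ (c - 1) / 2 →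
    l.getD ((c - 1) / 2) 0 ≤ l.getD c 0

def IsHeap (l : List Int) : Prop := Hinv 0 l

theorem siftdown_ok (s : Nat) : ∀ (pos : Nat) (l : List Int) (x : Int),
    pos < l.length → desc s pos = true →
    (∀ c, c < l.length → c ≠ s → desc s c = true → c ≠ pos →
        (l.set pos x).getD ((c - 1) / 2) 0 ≤ (l.set pos x).getD c 0) →
    (pos ≠ s → ∀ c, (c = 2 * pos + 1 ∨ c = 2 * pos + 2) → c < l.length →
        (l.set pos x).getD ((pos - 1) / 2) 0 ≤ (l.set pos x).getD c 0) →
    List.Perm (pySiftdownLoop l s pos x) (l.set pos x)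
    ∧ (pySiftdownLoop l s pos x).length = l.length
    ∧ (∀ j, desc s j = false → (pySiftdownLoop l s pos x).getD j 0 = l.getD j 0)
    ∧ (∀ c, c < l.length → c ≠ s → desc s c = true →
        (pySiftdownLoop l s pos x).getD ((c - 1) / 2) 0 ≤ (pySiftdownLoop l s pos x).getD c 0) := by
  intro pos
  induction pos using Nat.strongRecOn with
  | ind pos ih =>
  intro l x hpos hdesc hexc hgc
  have hspos : s ≤ pos := desc_ge hdesc
  by_cases h1 : s < pos
  · by_cases h2 : x < l.getD ((pos - 1) / 2) 0
    · -- bubble up one level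
      have hstep : pySiftdownLoop l s pos x
          = pySiftdownLoop (l.set pos (l.getD ((pos - 1) / 2) 0)) s ((pos - 1) / 2) x := by
        rw [pySiftdownLoop]; simp only [dif_pos h1, if_pos h2]
      have hppd : desc s ((pos - 1) / 2) = true := desc_parent hdesc (by omega)
      have hpplt : (pos - 1) / 2 < pos := by omega
      have hppl : (pos - 1) / 2 < l.length := by omega
      have hchild : pos = 2 * ((pos - 1) / 2) + 1 ∨ pos = 2 * ((pos - 1) / 2) + 2 :=
        child_eq pos (by omega)
      have hppge : s ≤ (pos - 1) / 2 := desc_ge hppd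
      have e_other : ∀ j, j ≠ pos → j ≠ (pos - 1) / 2 →
          ((l.set pos (l.getD ((pos - 1) / 2) 0)).set ((pos - 1) / 2) x).getD j 0
            = (l.set pos x).getD j 0 := by
        intro j hj1 hj2
        rw [gset_ne _ _ _ _ (Ne.symm hj2), gset_ne _ _ _ _ (Ne.symm hj1),
          gset_ne _ _ _ _ (Ne.symm hj1)]
      have e_pp : ((l.set pos (l.getD ((pos - 1) / 2) 0)).set ((pos - 1) / 2) x).getD
          ((pos - 1) / 2) 0 = x :=
        gset_self _ _ _ (by rw [List.length_set]; exact hppl)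
      have e_pos : ((l.set pos (l.getD ((pos - 1) / 2) 0)).set ((pos - 1) / 2) x).getD pos 0
          = l.getD ((pos - 1) / 2) 0 := by
        rw [gset_ne _ _ _ _ (show (pos - 1) / 2 ≠ pos by omega), gset_self _ _ _ hpos]
      have e_m_pp : (l.set pos x).getD ((pos - 1) / 2) 0 = l.getD ((pos - 1) / 2) 0 :=
        gset_ne _ _ _ _ (show pos ≠ (pos - 1) / 2 by omega)
      have hexc' : ∀ c, c < (l.set pos (l.getD ((pos - 1) / 2) 0)).length → c ≠ s →
          desc s c = true → c ≠ (pos - 1) / 2 →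
          ((l.set pos (l.getD ((pos - 1) / 2) 0)).set ((pos - 1) / 2) x).getD ((c - 1) / 2) 0
            ≤ ((l.set pos (l.getD ((pos - 1) / 2) 0)).set ((pos - 1) / 2) x).getD c 0 := by
        intro c hc hcs hcd hcpp
        rw [List.length_set] at hc
        by_cases hcpos : c = pos
        · subst hcpos
          rw [e_pp, e_pos]
          exact Int.le_of_lt h2
        · by_cases hcc : (c - 1) / 2 = pos
          · have hch : c = 2 * pos + 1 ∨ c = 2 * pos + 2 := by
              have := child_eq c (by omega)
              omega
            have hgoal := hgc (by omega) c hch hc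
            rw [e_m_pp] at hgoal
            rw [hcc, e_pos, e_other c hcpos (by omega)]
            exact hgoal
          · by_cases hcpar : (c - 1) / 2 = (pos - 1) / 2
            · rw [hcpar, e_pp, e_other c hcpos hcpp]
              have h3 := hexc c hc hcs hcd hcpos
              rw [hcpar, e_m_pp] at h3
              exact Int.le_trans (Int.le_of_lt h2) h3
            · rw [e_other c hcpos hcpp, e_other _ hcc hcpar]
              exact hexc c hc hcs hcd hcpos
      have hgc' : (pos - 1) / 2 ≠ s → ∀ c,
          (c = 2 * ((pos - 1) / 2) + 1 ∨ c = 2 * ((pos - 1) / 2) + 2) →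
          c < (l.set pos (l.getD ((pos - 1) / 2) 0)).length →
          ((l.set pos (l.getD ((pos - 1) / 2) 0)).set ((pos - 1) / 2) x).getD
              (((pos - 1) / 2 - 1) / 2) 0
            ≤ ((l.set pos (l.getD ((pos - 1) / 2) 0)).set ((pos - 1) / 2) x).getD c 0 := by
        intro hpps c hcch hc
        rw [List.length_set] at hc
        have hppz : 0 < (pos - 1) / 2 := by
          have := desc_ge hppd
          omega
        have hg1 : ((pos - 1) / 2 - 1) / 2 ≠ pos := by omega
        have hg2 : ((pos - 1) / 2 - 1) / 2 ≠ (pos - 1) / 2 := by omega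
        rw [e_other _ hg1 hg2]
        have t1 := hexc ((pos - 1) / 2) hppl hpps hppd (by omega)
        rw [e_m_pp] at t1
        by_cases hcpos : c = pos
        · subst hcpos
          rw [e_pos]
          exact t1
        · have hcpp2 : c ≠ (pos - 1) / 2 := by omega
          rw [e_other c hcpos hcpp2]
          have t2 := hexc c hc (by omega) (desc_child hppd hcch) hcpos
          rw [show (c - 1) / 2 = (pos - 1) / 2 by omega, e_m_pp] at t2
          exact Int.le_trans t1 t2
      obtain ⟨P, L, O, E⟩ := ih ((pos - 1) / 2) hpplt (l.set pos (l.getD ((pos - 1) / 2) 0)) x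
        (by rw [List.length_set]; exact hppl) hppd hexc' hgc'
      have hm1 : (l.set pos (l.getD ((pos - 1) / 2) 0)).set ((pos - 1) / 2) x
          = ((l.set pos x).set pos ((l.set pos x).getD ((pos - 1) / 2) 0)).set ((pos - 1) / 2)
              ((l.set pos x).getD pos 0) := by
        rw [List.set_set, e_m_pp, gset_self _ _ _ hpos]
      have hswap := swap_perm (l.set pos x) pos ((pos - 1) / 2)
        (by rw [List.length_set]; exact hpos) (by rw [List.length_set]; exact hppl)
      refine ⟨?_, ?_, ?_, ?_⟩
      · rw [hstep]
        exact P.trans (by rw [hm1]; exact hswap)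
      · rw [hstep, L, List.length_set]
      · intro j hj
        have hjpos : j ≠ pos := by intro e; rw [e, hdesc] at hj; exact Bool.noConfusion hj
        rw [hstep, O j hj, gset_ne _ _ _ _ (Ne.symm hjpos)]
      · intro c hc hcs hcd
        rw [hstep]
        exact E c (by rw [List.length_set]; exact hc) hcs hcd
    · -- settle here: x not below parent
      have hstep : pySiftdownLoop l s pos x = l.set pos x := by
        rw [pySiftdownLoop]; simp only [dif_pos h1, if_neg h2]
      rw [hstep]
      refine ⟨List.Perm.refl _, List.length_set .., ?_, ?_⟩
      · intro j hj
        have hjpos : j ≠ pos := by intro e; rw [e, hdesc] at hj; exact Bool.noConfusion hj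
        exact gset_ne _ _ _ _ (Ne.symm hjpos)
      · intro c hc hcs hcd
        by_cases hcpos : c = pos
        · subst hcpos
          rw [gset_ne _ _ _ _ (show c ≠ (c - 1) / 2 by omega), gset_self _ _ _ hpos]
          exact Int.not_lt.mp h2
        · exact hexc c hc hcs hcd hcpos
  · -- pos = s
    have hps : pos = s := by omega
    have hstep : pySiftdownLoop l s pos x = l.set pos x := by
      rw [pySiftdownLoop]; simp only [dif_neg h1]
    rw [hstep]
    refine ⟨List.Perm.refl _, List.length_set .., ?_, ?_⟩
    · intro j hj
      have hjpos : j ≠ pos := by intro e; rw [e, hdesc] at hj; exact Bool.noConfusion hj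
      exact gset_ne _ _ _ _ (Ne.symm hjpos)
    · intro c hc hcs hcd
      exact hexc c hc hcs hcd (by omega)

theorem siftupLoop_ok (s : Nat) (x : Int) : ∀ (n : Nat) (pos : Nat) (l : List Int),
    l.length - pos ≤ n →
    pos < l.length → desc s pos = true →
    (∀ c, c < l.length → c ≠ s → desc s c = true → c ≠ pos → (c - 1) / 2 ≠ pos →
        (l.set pos x).getD ((c - 1) / 2) 0 ≤ (l.set pos x).getD c 0) →
    (pos ≠ s → ∀ c, (c = 2 * pos + 1 ∨ c = 2 * pos + 2) → c < l.length →
        (l.set pos x).getD ((pos - 1) / 2) 0 ≤ (l.set pos x).getD c 0) →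
    (pySiftupLoop l l.length pos).2 < l.length
    ∧ desc s (pySiftupLoop l l.length pos).2 = true
    ∧ (pySiftupLoop l l.length pos).1.length = l.length
    ∧ List.Perm ((pySiftupLoop l l.length pos).1.set (pySiftupLoop l l.length pos).2 x) (l.set pos x)
    ∧ (∀ j, desc s j = false → (pySiftupLoop l l.length pos).1.getD j 0 = l.getD j 0)
    ∧ l.length ≤ 2 * (pySiftupLoop l l.length pos).2 + 1
    ∧ (∀ c, c < l.length → c ≠ s → desc s c = true → c ≠ (pySiftupLoop l l.length pos).2 →
          (c - 1) / 2 ≠ (pySiftupLoop l l.length pos).2 →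
        ((pySiftupLoop l l.length pos).1.set (pySiftupLoop l l.length pos).2 x).getD ((c - 1) / 2) 0
          ≤ ((pySiftupLoop l l.length pos).1.set (pySiftupLoop l l.length pos).2 x).getD c 0)
    ∧ ((pySiftupLoop l l.length pos).2 ≠ s →
        ∀ c, (c = 2 * (pySiftupLoop l l.length pos).2 + 1 ∨ c = 2 * (pySiftupLoop l l.length pos).2 + 2) →
          c < l.length →
        ((pySiftupLoop l l.length pos).1.set (pySiftupLoop l l.length pos).2 x).getD
            (((pySiftupLoop l l.length pos).2 - 1) / 2) 0
          ≤ ((pySiftupLoop l l.length pos).1.set (pySiftupLoop l l.length pos).2 x).getD c 0) := by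
  intro n
  induction n with
  | zero =>
    intro pos l hn hpos _ _ _
    omega
  | succ n ihn =>
    intro pos l hn hpos hdesc hJedges hJgc
    have hspos : s ≤ pos := desc_ge hdesc
    by_cases hlc : 2 * pos + 1 < l.length
    · -- descend one level
      have main : ∀ c2 : Nat, (c2 = 2 * pos + 1 ∨ c2 = 2 * pos + 2) → c2 < l.length →
          (∀ o, (o = 2 * pos + 1 ∨ o = 2 * pos + 2) → o < l.length →
            l.getD c2 0 ≤ l.getD o 0) →
          pySiftupLoop l l.length pos
            = pySiftupLoop (l.set pos (l.getD c2 0)) (l.set pos (l.getD c2 0)).length c2 →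
          (pySiftupLoop l l.length pos).2 < l.length
          ∧ desc s (pySiftupLoop l l.length pos).2 = true
          ∧ (pySiftupLoop l l.length pos).1.length = l.length
          ∧ List.Perm ((pySiftupLoop l l.length pos).1.set (pySiftupLoop l l.length pos).2 x)
              (l.set pos x)
          ∧ (∀ j, desc s j = false → (pySiftupLoop l l.length pos).1.getD j 0 = l.getD j 0)
          ∧ l.length ≤ 2 * (pySiftupLoop l l.length pos).2 + 1
          ∧ (∀ c, c < l.length → c ≠ s → desc s c = true → c ≠ (pySiftupLoop l l.length pos).2 →
                (c - 1) / 2 ≠ (pySiftupLoop l l.length pos).2 →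
              ((pySiftupLoop l l.length pos).1.set (pySiftupLoop l l.length pos).2 x).getD
                  ((c - 1) / 2) 0
                ≤ ((pySiftupLoop l l.length pos).1.set (pySiftupLoop l l.length pos).2 x).getD c 0)
          ∧ ((pySiftupLoop l l.length pos).2 ≠ s →
              ∀ c, (c = 2 * (pySiftupLoop l l.length pos).2 + 1
                    ∨ c = 2 * (pySiftupLoop l l.length pos).2 + 2) →
                c < l.length →
              ((pySiftupLoop l l.length pos).1.set (pySiftupLoop l l.length pos).2 x).getD
                  (((pySiftupLoop l l.length pos).2 - 1) / 2) 0
                ≤ ((pySiftupLoop l l.length pos).1.set (pySiftupLoop l l.length pos).2 x).getD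
                    c 0) := by
        intro c2 hc2cases hc2lt hmin hstep
        have hposc2 : pos < c2 := by omega
        have hc2desc : desc s c2 = true := desc_child hdesc hc2cases
        have e_m_other : ∀ j, j ≠ pos → (l.set pos x).getD j 0 = l.getD j 0 := by
          intro j hj; exact gset_ne _ _ _ _ (Ne.symm hj)
        have e_other : ∀ j, j ≠ pos → j ≠ c2 →
            ((l.set pos (l.getD c2 0)).set c2 x).getD j 0 = (l.set pos x).getD j 0 := by
          intro j hj1 hj2
          rw [gset_ne _ _ _ _ (Ne.symm hj2), gset_ne _ _ _ _ (Ne.symm hj1),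
            gset_ne _ _ _ _ (Ne.symm hj1)]
        have e_c2 : ((l.set pos (l.getD c2 0)).set c2 x).getD c2 0 = x :=
          gset_self _ _ _ (by rw [List.length_set]; exact hc2lt)
        have e_pos : ((l.set pos (l.getD c2 0)).set c2 x).getD pos 0 = l.getD c2 0 := by
          rw [gset_ne _ _ _ _ (show c2 ≠ pos by omega), gset_self _ _ _ hpos]
        have e_m_c2 : (l.set pos x).getD c2 0 = l.getD c2 0 :=
          gset_ne _ _ _ _ (show pos ≠ c2 by omega)
        have hJedges' : ∀ c, c < (l.set pos (l.getD c2 0)).length → c ≠ s → desc s c = true →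
            c ≠ c2 → (c - 1) / 2 ≠ c2 →
            ((l.set pos (l.getD c2 0)).set c2 x).getD ((c - 1) / 2) 0
              ≤ ((l.set pos (l.getD c2 0)).set c2 x).getD c 0 := by
          intro c hc hcs hcd hcc2 hccp2
          rw [List.length_set] at hc
          by_cases hcpos : c = pos
          · subst hcpos
            have hp1 : (c - 1) / 2 ≠ c := by omega
            have hp2 : (c - 1) / 2 ≠ c2 := by omega
            rw [e_other _ hp1 hp2, e_pos, ← e_m_c2]
            exact hJgc hcs c2 hc2cases hc2lt
          · by_cases hcc : (c - 1) / 2 = pos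
            · have hch : c = 2 * pos + 1 ∨ c = 2 * pos + 2 := by
                have := child_eq c (by omega)
                omega
              rw [hcc, e_pos, e_other c hcpos hcc2, e_m_other c hcpos]
              exact hmin c hch hc
            · rw [e_other c hcpos hcc2, e_other _ hcc hccp2]
              exact hJedges c hc hcs hcd hcpos hcc
        have hJgc' : c2 ≠ s → ∀ d, (d = 2 * c2 + 1 ∨ d = 2 * c2 + 2) →
            d < (l.set pos (l.getD c2 0)).length →
            ((l.set pos (l.getD c2 0)).set c2 x).getD ((c2 - 1) / 2) 0
              ≤ ((l.set pos (l.getD c2 0)).set c2 x).getD d 0 := by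
          intro _ d hdch hd
          rw [List.length_set] at hd
          have hc2p : (c2 - 1) / 2 = pos := by omega
          have hdpos : d ≠ pos := by omega
          have hdc2 : d ≠ c2 := by omega
          rw [hc2p, e_pos, e_other d hdpos hdc2, e_m_other d hdpos]
          have t2 := hJedges d hd (by omega) (desc_child hc2desc hdch) hdpos
            (by rw [show (d - 1) / 2 = c2 by omega]; omega)
          rw [show (d - 1) / 2 = c2 by omega, e_m_c2, e_m_other d hdpos] at t2
          exact t2
        obtain ⟨R1, R2, R3, R4, R5, R6, R7, R8⟩ :=
          ihn c2 (l.set pos (l.getD c2 0))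
            (by rw [List.length_set]; omega)
            (by rw [List.length_set]; exact hc2lt) hc2desc hJedges' hJgc'
        have hm1 : (l.set pos (l.getD c2 0)).set c2 x
            = ((l.set pos x).set pos ((l.set pos x).getD c2 0)).set c2
                ((l.set pos x).getD pos 0) := by
          rw [List.set_set, e_m_c2, gset_self _ _ _ hpos]
        have hswap := swap_perm (l.set pos x) pos c2
          (by rw [List.length_set]; exact hpos) (by rw [List.length_set]; exact hc2lt)
        rw [hstep]
        simp only [List.length_set] at R1 R2 R3 R4 R5 R6 R7 R8 ⊢
        refine ⟨R1, R2, R3, ?_, ?_, R6, R7, R8⟩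
        · exact R4.trans (by rw [hm1]; exact hswap)
        · intro j hj
          have hjpos : j ≠ pos := by intro e; rw [e, hdesc] at hj; exact Bool.noConfusion hj
          rw [R5 j hj, gset_ne _ _ _ _ (Ne.symm hjpos)]
      by_cases hP : 2 * pos + 1 + 1 < l.length
          ∧ ¬ (l.getD (2 * pos + 1) 0 < l.getD (2 * pos + 1 + 1) 0)
      · refine main (2 * pos + 2) (Or.inr rfl) (by omega) ?_ ?_
        · intro o ho hol
          rcases ho with ho | ho <;> subst ho
          · have h22 := hP.2
            rw [show 2 * pos + 1 + 1 = 2 * pos + 2 by omega] at h22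
            exact Int.not_lt.mp h22
          · exact Int.le_refl _
        · rw [pySiftupLoop]
          simp only [dif_pos hlc, if_pos hP, List.length_set]
      · refine main (2 * pos + 1) (Or.inl rfl) hlc ?_ ?_
        · intro o ho hol
          rcases ho with ho | ho <;> subst ho
          · exact Int.le_refl _
          · rcases Decidable.not_and_iff_not_or_not.mp hP with h | h
            · omega
            · have hlt := Decidable.not_not.mp h
              rw [show 2 * pos + 1 + 1 = 2 * pos + 2 by omega] at hlt
              exact Int.le_of_lt hlt
        · rw [pySiftupLoop]
          simp only [dif_pos hlc, if_neg hP, List.length_set]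
    · -- leaf reached
      have hstep : pySiftupLoop l l.length pos = (l, pos) := by
        rw [pySiftupLoop]; simp only [dif_neg hlc]
      rw [hstep]
      exact ⟨hpos, hdesc, rfl, List.Perm.refl _, fun _ _ => rfl, by omega, hJedges, hJgc⟩

theorem siftup_ok (s : Nat) (l : List Int) (hs : s < l.length)
    (hexc : ∀ c, c < l.length → c ≠ s → desc s c = true → (c - 1) / 2 ≠ s →
        l.getD ((c - 1) / 2) 0 ≤ l.getD c 0) :
    List.Perm (pySiftup l s) l
    ∧ (pySiftup l s).length = l.length
    ∧ (∀ j, desc s j = false → (pySiftup l s).getD j 0 = l.getD j 0)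
    ∧ (∀ c, c < l.length → c ≠ s → desc s c = true →
        (pySiftup l s).getD ((c - 1) / 2) 0 ≤ (pySiftup l s).getD c 0) := by
  have hset : l.set s (l.getD s 0) = l := set_self l s hs
  obtain ⟨R1, R2, R3, R4, R5, R6, R7, R8⟩ :=
    siftupLoop_ok s (l.getD s 0) l.length s l (by omega) hs (desc_self s)
      (by intro c hc hcs hcd _ hps; rw [hset]; exact hexc c hc hcs hcd hps)
      (by intro hss; exact absurd rfl hss)
  rw [hset] at R4
  obtain ⟨P, L, O, E⟩ := siftdown_ok s (pySiftupLoop l l.length s).2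
    (pySiftupLoop l l.length s).1 (l.getD s 0) (by rw [R3]; exact R1) R2
    (by
      intro c hc hcs hcd hcr
      rw [R3] at hc
      exact R7 c hc hcs hcd hcr (by omega))
    (by
      intro hrs c hcch hc
      rw [R3] at hc
      omega)
  have hdef : pySiftup l s
      = pySiftdownLoop (pySiftupLoop l l.length s).1 s (pySiftupLoop l l.length s).2
          (l.getD s 0) := rfl
  rw [hdef]
  refine ⟨P.trans R4, L.trans R3, ?_, ?_⟩
  · intro j hj
    rw [O j hj, R5 j hj]
  · intro c hc hcs hcd
    exact E c (by rw [R3]; exact hc) hcs hcd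

theorem heapify_fold_ok : ∀ (k : Nat) (l : List Int), 2 * k ≤ l.length → Hinv k l →
    List.Perm ((List.range k).reverse.foldl (fun h i => pySiftup h i) l) l
    ∧ ((List.range k).reverse.foldl (fun h i => pySiftup h i) l).length = l.length
    ∧ IsHeap ((List.range k).reverse.foldl (fun h i => pySiftup h i) l) := by
  intro k
  induction k with
  | zero =>
    intro l _ hinv
    exact ⟨List.Perm.refl _, rfl, hinv⟩
  | succ k ih =>
    intro l hk hinv
    have hrw : (List.range (k + 1)).reverse = k :: (List.range k).reverse := by
      rw [List.range_succ, List.reverse_append]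
      rfl
    rw [hrw, List.foldl_cons]
    have hkl : k < l.length := by omega
    obtain ⟨S1, S2, S3, S4⟩ := siftup_ok k l hkl (by
      intro c hc hck hcd hcp
      have hpd : desc k ((c - 1) / 2) = true := desc_parent hcd hck
      have hpge : k ≤ (c - 1) / 2 := desc_ge hpd
      have hcge : k ≤ c := desc_ge hcd
      exact hinv c (by omega) hc (by omega))
    have hinv' : Hinv k (pySiftup l k) := by
      intro c h0c hc hkp
      rw [S2] at hc
      by_cases hdp : desc k ((c - 1) / 2) = true
      · have hdc : desc k c = true := desc_child hdp (child_eq c h0c)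
        have hpge : k ≤ (c - 1) / 2 := desc_ge hdp
        exact S4 c hc (by omega) hdc
      · have hpk : (c - 1) / 2 ≠ k := by
          intro e
          rw [e, desc_self] at hdp
          exact hdp rfl
        have hdc : desc k c = false := by
          cases hcase : desc k c with
          | false => rfl
          | true =>
            have hck : c ≠ k := by
              intro e
              exact hpk (by omega)
            exact absurd (desc_parent hcase hck) hdp
        rw [S3 c hdc, S3 _ (by cases hcase : desc k ((c-1)/2) with
            | false => rfl
            | true => exact absurd hcase hdp)]
        exact hinv c h0c (by omega) (by omega)
    obtain ⟨P, L, H⟩ := ih (pySiftup l k) (by rw [S2]; omega) hinv'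
    exact ⟨P.trans S1, L.trans S2, H⟩

theorem heapify_ok (l : List Int) :
    List.Perm (pyHeapify l) l ∧ IsHeap (pyHeapify l) := by
  have h := heapify_fold_ok (l.length / 2) l (by omega) (by
    intro c h0c hc hp
    omega)
  exact ⟨h.1, h.2.2⟩

theorem gappend_last (l : List Int) (x : Int) : (l ++ [x]).getD l.length 0 = x := by
  simp [List.getD_eq_getElem?_getD, List.getElem?_append_right]

theorem gappend_lt (l : List Int) (x : Int) (j : Nat) (h : j < l.length) :
    (l ++ [x]).getD j 0 = l.getD j 0 := by
  simp [List.getD_eq_getElem?_getD, List.getElem?_append_left h]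

theorem heappush_ok (l : List Int) (x : Int) (h : IsHeap l) :
    IsHeap (pyHeappush l x) ∧ List.Perm (pyHeappush l x) (l ++ [x]) := by
  have hsetid : (l ++ [x]).set l.length x = l ++ [x] := by
    have := set_self (l ++ [x]) l.length (by simp)
    rw [gappend_last] at this
    exact this
  unfold pyHeappush
  obtain ⟨P, L, O, E⟩ := siftdown_ok 0 l.length (l ++ [x]) x (by simp) (desc_zero _)
    (by
      intro c hc hc0 _ hclen
      rw [hsetid]
      simp only [List.length_append, List.length_cons, List.length_nil] at hc
      have hcl : c < l.length := by omega
      have hpl : (c - 1) / 2 < l.length := by omega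
      rw [gappend_lt _ _ _ hcl, gappend_lt _ _ _ hpl]
      exact h c (by omega) hcl (by omega))
    (by
      intro _ c hcch hc
      simp only [List.length_append, List.length_cons, List.length_nil] at hc
      omega)
  rw [hsetid] at P
  constructor
  · intro c h0c hc hp
    rw [L] at hc
    exact E c hc (by omega) (desc_zero c)
  · exact P

theorem gdropLast (l : List Int) (j : Nat) (h : j < l.length - 1) :
    l.dropLast.getD j 0 = l.getD j 0 := by
  have hj : j < l.length := by omega
  simp [List.getD_eq_getElem?_getD, List.getElem?_eq_getElem, h, hj, List.getElem_dropLast]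

theorem headD_dropLast (l : List Int) (h : 2 ≤ l.length) : l.dropLast.headD 0 = l.headD 0 := by
  cases l with
  | nil => simp at h
  | cons a t => cases t with
    | nil => simp at h
    | cons b u => simp

theorem heappop_ok (l : List Int) (hne : l ≠ []) (h : IsHeap l) :
    (pyHeappop l).1 = l.headD 0
    ∧ IsHeap (pyHeappop l).2
    ∧ List.Perm ((pyHeappop l).1 :: (pyHeappop l).2) l := by
  by_cases hlen : l.length < 2
  · have h1 : l.length = 1 := by
      cases l with
      | nil => exact absurd rfl hne
      | cons a t => simp only [List.length_cons] at hlen ⊢; omega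
    obtain ⟨a, rfl⟩ := List.length_eq_one_iff.mp h1
    refine ⟨rfl, ?_, ?_⟩
    · intro c h0c hc hp
      simp [pyHeappop] at hc
    · exact List.Perm.refl _
  · have hlast : l.getLast? = some (l.getLast hne) := List.getLast?_eq_some_getLast hne
    have hrne : l.dropLast.isEmpty = false := by
      cases l with
      | nil => exact absurd rfl hne
      | cons a t => cases t with
        | nil => simp at hlen
        | cons b u => simp
    have hstep : pyHeappop l
        = (l.dropLast.headD 0, pySiftup (l.dropLast.set 0 (l.getLast?.getD 0)) 0) := by
      rw [pyHeappop]
      simp only [hrne, Bool.false_eq_true, if_false]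
    have hmlen : (l.dropLast.set 0 (l.getLast?.getD 0)).length = l.length - 1 := by
      rw [List.length_set, List.length_dropLast]
    obtain ⟨P, L, O, E⟩ := siftup_ok 0 (l.dropLast.set 0 (l.getLast?.getD 0))
      (by omega)
      (by
        intro c hc hc0 _ hp0
        rw [hmlen] at hc
        have hpl : (c - 1) / 2 < l.length - 1 := by omega
        rw [gset_ne _ _ _ _ (Ne.symm hp0), gset_ne _ _ _ _ (Ne.symm hc0),
          gdropLast _ _ hpl, gdropLast _ _ (by omega)]
        exact h c (by omega) (by omega) (by omega))
    rw [hstep]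
    refine ⟨headD_dropLast l (by omega), ?_, ?_⟩
    · intro c h0c hc hp
      rw [L, hmlen] at hc
      exact E c (by omega) (by omega) (desc_zero c)
    · cases hrest : l.dropLast with
      | nil => rw [hrest] at hrne; simp at hrne
      | cons a t =>
        have hl : (a :: t) ++ [l.getLast?.getD 0] = l := by
          rw [← hrest, hlast]
          exact List.dropLast_concat_getLast hne
        have hm : l.dropLast.set 0 (l.getLast?.getD 0) = l.getLast?.getD 0 :: t := by
          rw [hrest]
          rfl
        rw [hm] at P
        dsimp only
        simp only [List.set_cons_zero, List.headD_cons]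
        refine List.Perm.trans (List.Perm.cons a P) ?_
        refine List.Perm.trans (List.Perm.cons a (List.perm_append_singleton _ _).symm) ?_
        rw [List.cons_append] at hl
        rw [hl]

theorem heap_min (l : List Int) (h : IsHeap l) :
    ∀ i, i < l.length → l.getD 0 0 ≤ l.getD i 0 := by
  intro i
  induction i using Nat.strongRecOn with
  | ind i ih =>
    intro hi
    rcases Nat.eq_zero_or_pos i with h0 | h0
    · simp [h0]
    · exact Int.le_trans (ih ((i - 1) / 2) (by omega) (by omega)) (h i h0 hi (Nat.zero_le _))

theorem headD_eq_getD (l : List Int) : l.headD 0 = l.getD 0 0 := by cases l <;> simp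

theorem getD0_mem (l : List Int) (h : l ≠ []) : l.getD 0 0 ∈ l := by
  cases l <;> simp_all

theorem getD_lt (l : List Int) (i : Nat) (h : i < l.length) : l.getD i 0 = l[i] := by
  simp [List.getD_eq_getElem?_getD, List.getElem?_eq_getElem h]

theorem min_le_mem_heap (h : List Int) (hh : IsHeap h) : ∀ y ∈ h, h.getD 0 0 ≤ y := by
  intro y hy
  obtain ⟨i, hi, rfl⟩ := List.mem_iff_getElem.mp hy
  rw [← getD_lt _ _ hi]
  exact heap_min h hh i hi

-- ===== the two-queue side =====

def SOrd (l : List Int) : Prop := l.Pairwise (fun a b : Int => a ≤ b)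
def TOrd (l : List Int) : Prop := l.Pairwise (fun a b : Int => b ≤ 3 * a)
def XRel (q1 q2 : List Int) : Prop := ∀ m ∈ q2, ∀ x ∈ q1, m ≤ 3 * x

-- tail-form ghost version of B's loop (proof device; the port twoLoop is index-based)
def popT (q1 q2 : List Int) : Int × List Int × List Int :=
  if q2 = [] ∨ (q1 ≠ [] ∧ q1.headD 0 ≤ q2.headD 0) then (q1.headD 0, q1.tail, q2)
  else (q2.headD 0, q1, q2.tail)

def twoLoopT (fuel : Nat) (q1 q2 : List Int) (answer K : Int) : Int :=
  if q1 ≠ [] ∨ q2 ≠ [] then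
    if K ≤ (popT q1 q2).1 then answer
    else if q1.length + q2.length < 2 then -1
    else
      match fuel with
      | 0 => -1
      | fuel + 1 =>
        let p1 := popT q1 q2
        let p2 := popT p1.2.1 p1.2.2
        twoLoopT fuel p2.2.1 (p2.2.2 ++ [p1.1 + 2 * p2.1]) (answer + 1) K
  else -1

theorem sorted_head_le (a : Int) (t : List Int) (h : SOrd (a :: t)) :
    ∀ y ∈ a :: t, a ≤ y := by
  intro y hy
  rcases List.mem_cons.mp hy with rfl | hyt
  · exact Int.le_refl _
  · exact (List.pairwise_cons.mp h).1 y hyt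

theorem popT_spec (q1 q2 : List Int) (h1 : SOrd q1) (h2 : SOrd q2)
    (hne : ¬(q1 = [] ∧ q2 = [])) :
    (q1 ++ q2).Perm ((popT q1 q2).1 :: ((popT q1 q2).2.1 ++ (popT q1 q2).2.2))
    ∧ (∀ y ∈ q1 ++ q2, (popT q1 q2).1 ≤ y)
    ∧ SOrd (popT q1 q2).2.1 ∧ SOrd (popT q1 q2).2.2
    ∧ ((q1 ≠ [] ∧ (popT q1 q2).1 = q1.headD 0 ∧ (popT q1 q2).2.1 = q1.tail ∧ (popT q1 q2).2.2 = q2)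
       ∨ (q2 ≠ [] ∧ (popT q1 q2).1 = q2.headD 0 ∧ (popT q1 q2).2.1 = q1 ∧ (popT q1 q2).2.2 = q2.tail)) := by
  cases q1 with
  | nil =>
    cases q2 with
    | nil => exact absurd ⟨rfl, rfl⟩ hne
    | cons m t2 =>
      have he : popT [] (m :: t2) = (m, [], t2) := by
        simp [popT]
      rw [he]
      refine ⟨by simp, ?_, List.Pairwise.nil, (List.pairwise_cons.mp h2).2, Or.inr (by simp)⟩
      intro y hy
      simp only [List.nil_append] at hy
      exact sorted_head_le m t2 h2 y hy
  | cons a t1 =>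
    cases q2 with
    | nil =>
      have he : popT (a :: t1) [] = (a, t1, []) := by
        simp [popT]
      rw [he]
      refine ⟨by simp, ?_, (List.pairwise_cons.mp h1).2, List.Pairwise.nil, Or.inl (by simp)⟩
      intro y hy
      simp only [List.append_nil] at hy
      exact sorted_head_le a t1 h1 y hy
    | cons m t2 =>
      by_cases hle : a ≤ m
      · have he : popT (a :: t1) (m :: t2) = (a, t1, m :: t2) := by
          simp [popT, hle]
        rw [he]
        refine ⟨by simp, ?_, (List.pairwise_cons.mp h1).2, h2, Or.inl (by simp)⟩
        intro y hy
        rcases List.mem_append.mp hy with hy1 | hy2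
        · exact sorted_head_le a t1 h1 y hy1
        · exact Int.le_trans hle (sorted_head_le m t2 h2 y hy2)
      · have he : popT (a :: t1) (m :: t2) = (m, a :: t1, t2) := by
          simp [popT, hle]
        rw [he]
        refine ⟨List.perm_middle.symm.symm, ?_, h1, (List.pairwise_cons.mp h2).2, Or.inr (by simp)⟩
        intro y hy
        rcases List.mem_append.mp hy with hy1 | hy2
        · exact Int.le_trans (Int.le_of_lt (Int.not_le.mp hle))
            (sorted_head_le a t1 h1 y hy1)
        · exact sorted_head_le m t2 h2 y hy2

theorem least_unique {l1 l2 : List Int} (p : l1.Perm l2) {x z : Int}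
    (hx : x ∈ l1) (hxle : ∀ y ∈ l1, x ≤ y) (hz : z ∈ l2) (hzle : ∀ y ∈ l2, z ≤ y) : x = z :=
  Int.le_antisymm (hxle z (p.mem_iff.mpr hz)) (hzle x (p.mem_iff.mp hx))

theorem heap_headD_eq (h q1 q2 : List Int) (hh : IsHeap h) (h1 : SOrd q1) (h2 : SOrd q2)
    (hperm : h.Perm (q1 ++ q2)) (hne : ¬(q1 = [] ∧ q2 = [])) :
    h.headD 0 = (popT q1 q2).1 := by
  have hune : q1 ++ q2 ≠ [] := by
    intro e
    rcases List.append_eq_nil_iff.mp e with ⟨e1, e2⟩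
    exact hne ⟨e1, e2⟩
  have hne' : h ≠ [] := by
    intro e
    rw [e] at hperm
    exact hune (List.perm_nil.mp hperm.symm)
  obtain ⟨P, L, _, _, _⟩ := popT_spec q1 q2 h1 h2 hne
  have hzmem : (popT q1 q2).1 ∈ q1 ++ q2 := P.mem_iff.mpr (List.mem_cons_self ..)
  rw [headD_eq_getD]
  exact least_unique hperm (getD0_mem h hne') (min_le_mem_heap h hh) hzmem L

theorem loop_eqT : ∀ (fuel : Nat) (heap q1 q2 : List Int) (ans K : Int),
    IsHeap heap → SOrd q1 → SOrd q2 → TOrd q2 → XRel q1 q2 → heap.Perm (q1 ++ q2) →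
    solLoopA fuel heap ans K = twoLoopT fuel q1 q2 ans K := by
  intro fuel
  induction fuel with
  | zero =>
    intro heap q1 q2 ans K hh h1 h2 hT hX hperm
    by_cases hemp : q1 = [] ∧ q2 = []
    · obtain ⟨e1, e2⟩ := hemp
      subst e1; subst e2
      have : heap = [] := List.perm_nil.mp (by simpa using hperm)
      subst this
      rfl
    · have hne : heap ≠ [] := by
        intro e
        rw [e] at hperm
        rcases List.append_eq_nil_iff.mp (List.perm_nil.mp hperm.symm) with ⟨e1, e2⟩
        exact hemp ⟨e1, e2⟩
      have hneb : heap.isEmpty = false := by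
        cases heap with
        | nil => exact absurd rfl hne
        | cons c u => rfl
      have hhead := heap_headD_eq heap q1 q2 hh h1 h2 hperm hemp
      have hlen : heap.length = q1.length + q2.length := by
        rw [hperm.length_eq, List.length_append]
      have hor : q1 ≠ [] ∨ q2 ≠ [] := by tauto
      rw [solLoopA, twoLoopT, if_pos hor, hneb, hhead, hlen]
      simp only [Bool.false_eq_true, if_false]
  | succ fuel ih =>
    intro heap q1 q2 ans K hh h1 h2 hT hX hperm
    by_cases hemp : q1 = [] ∧ q2 = []
    · obtain ⟨e1, e2⟩ := hemp
      subst e1; subst e2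
      have : heap = [] := List.perm_nil.mp (by simpa using hperm)
      subst this
      rfl
    · have hne : heap ≠ [] := by
        intro e
        rw [e] at hperm
        rcases List.append_eq_nil_iff.mp (List.perm_nil.mp hperm.symm) with ⟨e1, e2⟩
        exact hemp ⟨e1, e2⟩
      have hneb : heap.isEmpty = false := by
        cases heap with
        | nil => exact absurd rfl hne
        | cons c u => rfl
      have hhead := heap_headD_eq heap q1 q2 hh h1 h2 hperm hemp
      have hlen : heap.length = q1.length + q2.length := by
        rw [hperm.length_eq, List.length_append]
      have hor : q1 ≠ [] ∨ q2 ≠ [] := by tauto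
      rw [solLoopA, twoLoopT, if_pos hor, hneb, hhead, hlen]
      simp only [Bool.false_eq_true, if_false]
      by_cases hK : K ≤ (popT q1 q2).1
      · simp only [if_pos hK]
      · simp only [if_neg hK]
        by_cases hl2 : q1.length + q2.length < 2
        · simp only [if_pos hl2]
        · simp only [if_neg hl2]
          -- the real step
          obtain ⟨P1, L1, S11, S12, D1⟩ := popT_spec q1 q2 h1 h2 hemp
          have hlu : (q1 ++ q2).length = 1 + ((popT q1 q2).2.1 ++ (popT q1 q2).2.2).length := by
            rw [P1.length_eq]; simp; omega
          have hne2 : ¬((popT q1 q2).2.1 = [] ∧ (popT q1 q2).2.2 = []) := by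
            intro ⟨e1, e2⟩
            rw [e1, e2] at hlu
            simp [List.length_append] at hlu
            omega
          obtain ⟨P2, L2, S21, S22, D2⟩ := popT_spec (popT q1 q2).2.1 (popT q1 q2).2.2 S11 S12 hne2
          -- heap pops
          obtain ⟨hv1, hh1, hp1⟩ := heappop_ok heap hne hh
          have hv1' : (pyHeappop heap).1 = (popT q1 q2).1 := hv1.trans hhead
          have hrest1 : (pyHeappop heap).2.Perm ((popT q1 q2).2.1 ++ (popT q1 q2).2.2) := by
            have hx := hp1.trans (hperm.trans P1)
            rw [hv1'] at hx
            exact hx.cons_inv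
          have hrn : (pyHeappop heap).2 ≠ [] := by
            intro e
            rw [e] at hrest1
            have e0 : (popT q1 q2).2.1 ++ (popT q1 q2).2.2 = [] :=
              List.perm_nil.mp hrest1.symm
            rw [e0] at hlu
            simp [List.length_append] at hlu
            omega
          have hhead2 : (pyHeappop heap).2.headD 0 = (popT (popT q1 q2).2.1 (popT q1 q2).2.2).1 :=
            heap_headD_eq _ _ _ hh1 S11 S12 hrest1 hne2
          obtain ⟨hv2, hh2, hp2⟩ := heappop_ok (pyHeappop heap).2 hrn hh1
          have hv2' : (pyHeappop (pyHeappop heap).2).1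
              = (popT (popT q1 q2).2.1 (popT q1 q2).2.2).1 := hv2.trans hhead2
          have hrest2 : (pyHeappop (pyHeappop heap).2).2.Perm
              ((popT (popT q1 q2).2.1 (popT q1 q2).2.2).2.1
                ++ (popT (popT q1 q2).2.1 (popT q1 q2).2.2).2.2) := by
            have hx := hp2.trans (hrest1.trans P2)
            rw [hv2'] at hx
            exact hx.cons_inv
          obtain ⟨hH3, hP3⟩ := heappush_ok (pyHeappop (pyHeappop heap).2).2
            ((pyHeappop heap).1 + (pyHeappop (pyHeappop heap).2).1 * 2) hh2
          -- abbreviations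
          set r1 := popT q1 q2 with hr1
          set r2 := popT r1.2.1 r1.2.2 with hr2
          have hval : (pyHeappop heap).1 + (pyHeappop (pyHeappop heap).2).1 * 2
              = r1.1 + 2 * r2.1 := by
            rw [hv1', hv2']; ring
          -- membership transfer
          have mem1 : ∀ y ∈ r1.2.1 ++ r1.2.2, y ∈ q1 ++ q2 := by
            intro y hy
            exact P1.mem_iff.mpr (List.mem_cons_of_mem _ hy)
          have mem2 : ∀ y ∈ r2.2.1 ++ r2.2.2, y ∈ r1.2.1 ++ r1.2.2 := by
            intro y hy
            exact P2.mem_iff.mpr (List.mem_cons_of_mem _ hy)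
          have hr2mem : r2.1 ∈ r1.2.1 ++ r1.2.2 := P2.mem_iff.mpr (List.mem_cons_self ..)
          have hab : r1.1 ≤ r2.1 := L1 r2.1 (mem1 _ hr2mem)
          -- sublists
          have sA : r1.2.1.Sublist q1 := by
            rcases D1 with ⟨_, _, e, _⟩ | ⟨_, _, e, _⟩
            · rw [e]; exact List.tail_sublist q1
            · rw [e]
          have sB : r1.2.2.Sublist q2 := by
            rcases D1 with ⟨_, _, _, e⟩ | ⟨_, _, _, e⟩
            · rw [e]
            · rw [e]; exact List.tail_sublist q2
          have sC : r2.2.1.Sublist r1.2.1 := by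
            rcases D2 with ⟨_, _, e, _⟩ | ⟨_, _, e, _⟩
            · rw [e]; exact List.tail_sublist _
            · rw [e]
          have sD : r2.2.2.Sublist r1.2.2 := by
            rcases D2 with ⟨_, _, _, e⟩ | ⟨_, _, _, e⟩
            · rw [e]
            · rw [e]; exact List.tail_sublist _
          have sub1 : r2.2.1.Sublist q1 := sC.trans sA
          have sub2 : r2.2.2.Sublist q2 := sD.trans sB
          -- key bound: every remaining mix is ≤ 3 * (first popped value)
          have h3a : ∀ m ∈ r2.2.2, m ≤ 3 * r1.1 := by
            intro m hm
            rcases D1 with ⟨hq1ne, he, he1, he2⟩ | ⟨hq2ne, he, he1, he2⟩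
            · have hmq2 : m ∈ q2 := sub2.subset hm
              have haq1 : r1.1 ∈ q1 := by
                rw [he]
                cases q1 with
                | nil => exact absurd rfl hq1ne
                | cons a t => exact List.mem_cons_self ..
              exact hX m hmq2 r1.1 haq1
            · have hmt : m ∈ r1.2.2 := sD.subset hm
              rw [he2] at hmt
              cases q2 with
              | nil => exact absurd rfl hq2ne
              | cons a t =>
                have : r1.1 = a := by rw [he]; rfl
                rw [this]
                exact (List.pairwise_cons.mp hT).1 m hmt
          have hble : ∀ m ∈ r2.2.1 ++ r2.2.2, r2.1 ≤ m := fun m hm => L2 m (mem2 m hm)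
          have hale : ∀ m ∈ r2.2.1 ++ r2.2.2, r1.1 ≤ m := fun m hm => L1 m (mem1 m (mem2 m hm))
          -- invariants for the successor state
          have hSnew : SOrd (r2.2.2 ++ [r1.1 + 2 * r2.1]) := by
            rw [SOrd, List.pairwise_append]
            refine ⟨S22, List.pairwise_singleton _ _, ?_⟩
            intro m hm y hy
            rw [List.mem_singleton] at hy
            subst hy
            have t1 := h3a m hm
            omega
          have hTnew : TOrd (r2.2.2 ++ [r1.1 + 2 * r2.1]) := by
            rw [TOrd, List.pairwise_append]
            refine ⟨hT.sublist sub2, List.pairwise_singleton _ _, ?_⟩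
            intro m hm y hy
            rw [List.mem_singleton] at hy
            subst hy
            have t1 := hble m (List.mem_append_right _ hm)
            have t2 := hale m (List.mem_append_right _ hm)
            omega
          have hXnew : XRel r2.2.1 (r2.2.2 ++ [r1.1 + 2 * r2.1]) := by
            intro m hm x hx
            rcases List.mem_append.mp hm with hm2 | hm1
            · exact hX m (sub2.subset hm2) x (sub1.subset hx)
            · rw [List.mem_singleton] at hm1
              subst hm1
              have t1 := hale x (List.mem_append_left _ hx)
              have t2 := hble x (List.mem_append_left _ hx)
              omega
          have hPfinal : (pyHeappush (pyHeappop (pyHeappop heap).2).2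
              ((pyHeappop heap).1 + (pyHeappop (pyHeappop heap).2).1 * 2)).Perm
              (r2.2.1 ++ (r2.2.2 ++ [r1.1 + 2 * r2.1])) := by
            refine hP3.trans ?_
            rw [hval, ← List.append_assoc]
            exact hrest2.append_right _
          show solLoopA fuel
              (pyHeappush (pyHeappop (pyHeappop heap).2).2
                ((pyHeappop heap).1 + (pyHeappop (pyHeappop heap).2).1 * 2)) (ans + 1) K
            = twoLoopT fuel r2.2.1 (r2.2.2 ++ [r1.1 + 2 * r2.1]) (ans + 1) K
          exact ih _ _ _ (ans + 1) K hH3 S21 hSnew hTnew hXnew hPfinal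

-- bridge: the index-based port equals the tail-form ghost loop
theorem drop_headD (l : List Int) (n : Nat) : (l.drop n).headD 0 = l.getD n 0 := by
  induction n generalizing l with
  | zero => cases l <;> simp
  | succ n ih =>
    cases l with
    | nil => simp
    | cons a t => simpa using ih t

theorem drop_nil_iff (l : List Int) (n : Nat) : l.drop n = [] ↔ l.length ≤ n := by
  rw [← List.length_eq_zero_iff, List.length_drop]
  omega

theorem idx_eq_tail : ∀ (fuel : Nat) (base : List Int) (i : Nat) (mixes : List Int) (j : Nat)
    (ans K : Int), i ≤ base.length → j ≤ mixes.length →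
    twoLoop fuel base i mixes j ans K = twoLoopT fuel (base.drop i) (mixes.drop j) ans K := by
  intro fuel
  induction fuel with
  | zero =>
    intro base i mixes j ans K hi hj
    rw [twoLoop, twoLoopT]
    by_cases ho : i < base.length ∨ j < mixes.length
    · have ho' : base.drop i ≠ [] ∨ mixes.drop j ≠ [] := by
        rcases ho with h | h
        · left; rw [Ne, drop_nil_iff]; omega
        · right; rw [Ne, drop_nil_iff]; omega
      rw [if_pos ho, if_pos ho']
      have hm1 : (if j = mixes.length ∨ (i < base.length ∧ base.getD i 0 ≤ mixes.getD j 0)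
          then base.getD i 0 else mixes.getD j 0) = (popT (base.drop i) (mixes.drop j)).1 := by
        rw [popT]
        by_cases hc : j = mixes.length ∨ (i < base.length ∧ base.getD i 0 ≤ mixes.getD j 0)
        · have hc' : mixes.drop j = [] ∨ (base.drop i ≠ [] ∧
              (base.drop i).headD 0 ≤ (mixes.drop j).headD 0) := by
            rcases hc with h | ⟨h1, h2⟩
            · left; rw [drop_nil_iff]; omega
            · right
              exact ⟨by rw [Ne, drop_nil_iff]; omega, by rw [drop_headD, drop_headD]; exact h2⟩
          rw [if_pos hc, if_pos hc', drop_headD]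
        · have hc' : ¬(mixes.drop j = [] ∨ (base.drop i ≠ [] ∧
              (base.drop i).headD 0 ≤ (mixes.drop j).headD 0)) := by
            intro h
            apply hc
            rcases h with h | ⟨h1, h2⟩
            · left; rw [drop_nil_iff] at h; omega
            · right
              rw [Ne, drop_nil_iff] at h1
              rw [drop_headD, drop_headD] at h2
              exact ⟨by omega, h2⟩
          rw [if_neg hc, if_neg hc', drop_headD]
      rw [hm1]
      by_cases hK : K ≤ (popT (base.drop i) (mixes.drop j)).1
      · simp only [if_pos hK]
      · simp only [if_neg hK]
        have hlen : base.length - i + (mixes.length - j)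
            = (base.drop i).length + (mixes.drop j).length := by
          simp [List.length_drop]
        rw [hlen]
    · have ho' : ¬(base.drop i ≠ [] ∨ mixes.drop j ≠ []) := by
        push_neg
        constructor <;> rw [drop_nil_iff] <;> omega
      rw [if_neg ho, if_neg ho']
  | succ fuel ih =>
    intro base i mixes j ans K hi hj
    rw [twoLoop, twoLoopT]
    by_cases ho : i < base.length ∨ j < mixes.length
    · have ho' : base.drop i ≠ [] ∨ mixes.drop j ≠ [] := by
        rcases ho with h | h
        · left; rw [Ne, drop_nil_iff]; omega
        · right; rw [Ne, drop_nil_iff]; omega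
      rw [if_pos ho, if_pos ho']
      have hcond : ∀ (i' j' : Nat), i' ≤ base.length → j' ≤ mixes.length →
          ((j' = mixes.length ∨ (i' < base.length ∧ base.getD i' 0 ≤ mixes.getD j' 0)) ↔
           (mixes.drop j' = [] ∨ (base.drop i' ≠ [] ∧
              (base.drop i').headD 0 ≤ (mixes.drop j').headD 0))) := by
        intro i' j' hi' hj'
        constructor
        · intro hc
          rcases hc with h | ⟨h1, h2⟩
          · left; rw [drop_nil_iff]; omega
          · right
            exact ⟨by rw [Ne, drop_nil_iff]; omega, by rw [drop_headD, drop_headD]; exact h2⟩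
        · intro h
          rcases h with h | ⟨h1, h2⟩
          · left; rw [drop_nil_iff] at h; omega
          · right
            rw [Ne, drop_nil_iff] at h1
            rw [drop_headD, drop_headD] at h2
            exact ⟨by omega, h2⟩
      have hm1 : (if j = mixes.length ∨ (i < base.length ∧ base.getD i 0 ≤ mixes.getD j 0)
          then base.getD i 0 else mixes.getD j 0) = (popT (base.drop i) (mixes.drop j)).1 := by
        rw [popT]
        by_cases hc : j = mixes.length ∨ (i < base.length ∧ base.getD i 0 ≤ mixes.getD j 0)
        · rw [if_pos hc, if_pos ((hcond i j hi hj).mp hc), drop_headD]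
        · rw [if_neg hc, if_neg (fun h => hc ((hcond i j hi hj).mpr h)), drop_headD]
      rw [hm1]
      by_cases hK : K ≤ (popT (base.drop i) (mixes.drop j)).1
      · simp only [if_pos hK]
      · simp only [if_neg hK]
        have hlen : base.length - i + (mixes.length - j)
            = (base.drop i).length + (mixes.drop j).length := by
          simp [List.length_drop]
        rw [hlen]
        by_cases hl2 : (base.drop i).length + (mixes.drop j).length < 2
        · simp only [if_pos hl2]
        · simp only [if_neg hl2]
          have hsz : 2 ≤ (base.length - i) + (mixes.length - j) := by
            simp only [List.length_drop] at hl2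
            omega
          -- first pop
          by_cases c1 : j = mixes.length ∨ (i < base.length ∧ base.getD i 0 ≤ mixes.getD j 0)
          · -- pop from base
            have hib : i < base.length := by
              rcases c1 with h | ⟨h, _⟩
              · omega
              · exact h
            have e1 : popT (base.drop i) (mixes.drop j)
                = ((base.drop i).headD 0, (base.drop i).tail, mixes.drop j) := by
              rw [popT, if_pos ((hcond i j hi hj).mp c1)]
            -- second pop
            by_cases c2 : j = mixes.length ∨ (i + 1 < base.length ∧ base.getD (i+1) 0 ≤ mixes.getD j 0)
            · have hib2 : i + 1 < base.length := by
                rcases c2 with h | ⟨h, _⟩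
                · omega
                · exact h
              have e2 : popT (base.drop (i+1)) (mixes.drop j)
                  = ((base.drop (i+1)).headD 0, (base.drop (i+1)).tail, mixes.drop j) := by
                rw [popT, if_pos ((hcond (i+1) j (by omega) hj).mp c2)]
              simp only [if_pos c1, if_pos c2]
              rw [ih base (i+2) (mixes ++ [base.getD i 0 + 2 * base.getD (i+1) 0]) j (ans+1) K
                (by omega) (by rw [List.length_append]; simp; omega)]
              rw [e1]
              simp only [List.tail_drop]
              rw [e2]
              simp only [List.tail_drop]
              rw [List.drop_append_of_le_length hj, drop_headD, drop_headD]
            · have e2 : popT ((base.drop i).tail) (mixes.drop j)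
                  = ((mixes.drop j).headD 0, (base.drop i).tail, (mixes.drop j).tail) := by
                rw [popT]
                rw [List.tail_drop]
                rw [if_neg (fun h => c2 ((hcond (i+1) j (by omega) hj).mpr h))]
              have hjm : j < mixes.length := by
                rcases not_or.mp c2 with ⟨h1, _⟩
                omega
              simp only [if_pos c1, if_neg c2]
              rw [ih base (i+1) (mixes ++ [base.getD i 0 + 2 * mixes.getD j 0]) (j+1) (ans+1) K
                (by omega) (by rw [List.length_append]; simp; omega)]
              rw [e1, e2]
              simp only [List.tail_drop]
              rw [List.drop_append_of_le_length (by omega), drop_headD, drop_headD]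
          · -- first pop from mixes
            have hjm : j < mixes.length := by
              rcases not_or.mp c1 with ⟨h1, _⟩
              omega
            have e1 : popT (base.drop i) (mixes.drop j)
                = ((mixes.drop j).headD 0, base.drop i, (mixes.drop j).tail) := by
              rw [popT, if_neg (fun h => c1 ((hcond i j hi hj).mpr h))]
            by_cases c2 : j + 1 = mixes.length ∨ (i < base.length ∧ base.getD i 0 ≤ mixes.getD (j+1) 0)
            · have hib2 : i < base.length ∨ j + 1 = mixes.length := by tauto
              have e2 : popT (base.drop i) ((mixes.drop j).tail)
                  = ((base.drop i).headD 0, (base.drop i).tail, (mixes.drop j).tail) := by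
                rw [popT, List.tail_drop]
                rw [if_pos ((hcond i (j+1) hi (by omega)).mp c2)]
              simp only [if_neg c1, if_pos c2]
              rw [ih base (i+1) (mixes ++ [mixes.getD j 0 + 2 * base.getD i 0]) (j+1) (ans+1) K
                (by
                  rcases c2 with h | ⟨h, _⟩
                  · -- j+1 = mixes.length: remaining base size must cover
                    simp only [List.length_drop] at hl2
                    omega
                  · omega)
                (by rw [List.length_append]; simp; omega)]
              rw [e1, e2]
              simp only [List.tail_drop]
              rw [List.drop_append_of_le_length (by omega), drop_headD, drop_headD]
            · have hjm2 : j + 1 < mixes.length := by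
                rcases not_or.mp c2 with ⟨h1, _⟩
                omega
              have e2 : popT (base.drop i) ((mixes.drop j).tail)
                  = ((mixes.drop (j+1)).headD 0, base.drop i, (mixes.drop (j+1)).tail) := by
                rw [popT, List.tail_drop]
                rw [if_neg (fun h => c2 ((hcond i (j+1) hi (by omega)).mpr h))]
              simp only [if_neg c1, if_neg c2]
              rw [ih base i (mixes ++ [mixes.getD j 0 + 2 * mixes.getD (j+1) 0]) (j+2) (ans+1) K
                hi (by rw [List.length_append]; simp; omega)]
              rw [e1, e2]
              simp only [List.tail_drop]
              rw [List.drop_append_of_le_length (by omega), drop_headD, drop_headD]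
    · have ho' : ¬(base.drop i ≠ [] ∨ mixes.drop j ≠ []) := by
        push_neg
        constructor <;> rw [drop_nil_iff] <;> omega
      rw [if_neg ho, if_neg ho']

theorem solution_eq_alt (scoville : List Int) (K : Int) :
    solution scoville K = solution_alt scoville K := by
  have hh := heapify_ok scoville
  have hs : SOrd (PySem.List.sorted scoville (fun x => x) false) := by
    have := PySem.List.sorted_pairwise (xs := scoville) (key := fun x => x)
    simpa [SOrd] using this
  have hp : (pyHeapify scoville).Perm
      (PySem.List.sorted scoville (fun x => x) false ++ []) := by
    rw [List.append_nil]
    exact (hh.1).trans (PySem.List.sorted_perm scoville (fun x => x) false).symm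
  have h1 := loop_eqT scoville.length (pyHeapify scoville)
    (PySem.List.sorted scoville (fun x => x) false) [] 0 K hh.2 hs
    List.Pairwise.nil List.Pairwise.nil (by intro m hm; simp at hm) hp
  have h2 := idx_eq_tail scoville.length (PySem.List.sorted scoville (fun x => x) false) 0
    [] 0 0 K (by omega) (by omega)
  rw [solution, solution_alt, h1, h2]
  simp

-- ===== VERDICT (by name: the statement is the Claim_ definition above) =====
theorem solution_spec : Claim_equal_solution := by
  intro scoville K _
  unfold Spec_solution
  exact solution_eq_alt scoville K
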